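-- pv_equiv track=rewrite | github.com/janvanrijn/openml-pimp | openmlpimp/examples/optimer_results_all.py | obtain_complete_tasks
-- ===== SOURCE A (Python) =====
-- def obtain_complete_tasks(results, tasks, classifiers=None):
--     if classifiers is None:
--         classifiers = results.keys()
--
--     complete_tasks = list()
--     for task_id in tasks.keys():
--         in_all = True
--         for classifier in classifiers:
--             for strategy in results[classifier]:
--                 if task_id not in results[classifier][strategy]:
--                     in_all = False
--         if in_all:
--             complete_tasks.append(task_id)
--     return complete_tasks
-- ===== SOURCE B (Python) =====
-- def obtain_complete_tasks(results, tasks, classifiers=None):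
--     cs = results.keys() if classifiers is None else classifiers
--     pairs = [d for c in cs for d in results[c].values()]
--     count = {}
--     for d in pairs:
--         for t in set(d):
--             count[t] = count.get(t, 0) + 1
--     n = len(pairs)
--     return [t for t in tasks.keys() if count.get(t, 0) == n]
-- ===== Notes on version B (the rewrite author's own statement) =====
-- stated objective: alternative
-- what changed: B replaces A's per-task rescan of every result dict by a counting pass: it flattens the (classifier,strategy) dicts once, counts in how many of the n dicts each task_id occurs, and keeps the tasks whose count equals n (count==0==n when there are no dicts, reproducing A's all-tasks case).
-- outside the precondition, e.g. on obtain_complete_tasks({}, {}, ['']): A returns [], B raises KeyError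
import Mathlib
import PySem

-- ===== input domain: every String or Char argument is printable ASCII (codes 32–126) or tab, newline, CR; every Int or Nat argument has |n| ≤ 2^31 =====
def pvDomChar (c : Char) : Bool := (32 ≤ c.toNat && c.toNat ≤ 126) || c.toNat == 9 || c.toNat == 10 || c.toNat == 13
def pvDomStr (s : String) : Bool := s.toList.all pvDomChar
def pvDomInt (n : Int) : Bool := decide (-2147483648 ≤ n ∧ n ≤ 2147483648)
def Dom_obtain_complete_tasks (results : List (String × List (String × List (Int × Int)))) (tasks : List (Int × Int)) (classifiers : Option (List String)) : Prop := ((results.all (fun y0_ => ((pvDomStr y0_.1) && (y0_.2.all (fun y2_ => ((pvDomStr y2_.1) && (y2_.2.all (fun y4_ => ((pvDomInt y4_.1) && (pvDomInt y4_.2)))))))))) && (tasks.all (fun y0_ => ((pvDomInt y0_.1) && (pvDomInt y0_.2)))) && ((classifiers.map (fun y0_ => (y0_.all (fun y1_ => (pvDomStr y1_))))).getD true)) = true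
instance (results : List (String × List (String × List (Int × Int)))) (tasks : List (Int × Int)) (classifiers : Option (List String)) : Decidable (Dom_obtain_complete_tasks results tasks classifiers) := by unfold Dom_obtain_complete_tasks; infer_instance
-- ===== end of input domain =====

-- B replaces A's per-task rescan of every result dict by a counting pass: it flattens
-- the (classifier, strategy) dicts once, counts in how many of the n dicts each task_id
-- occurs, and keeps the tasks whose count equals n (objective: alternative algorithm).

-- shared input marshalling: the Python dict-of-dict-of-dict argument as a PySem.Dict
def pvResultsDict (results : List (String × List (String × List (Int × Int)))) :
    PySem.Dict String (PySem.Dict String (PySem.Dict Int Int)) :=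
  PySem.Dict.ofList (results.map (fun p =>
    (p.1, PySem.Dict.ofList (p.2.map (fun q => (q.1, PySem.Dict.ofList q.2))))))

-- ===== PORT A =====
def obtain_complete_tasks (results : List (String × List (String × List (Int × Int)))) (tasks : List (Int × Int)) (classifiers : Option (List String)) : List Int :=
  let R := pvResultsDict results
  let T : PySem.Dict Int Int := PySem.Dict.ofList tasks
  let cls : List String := match classifiers with
    | none => R.keys
    | some cs => cs
  T.keys.foldl (fun complete_tasks task_id =>
    let in_all := cls.foldl (fun in_all classifier =>
      (R.getD classifier PySem.Dict.empty).keys.foldl (fun in_all strategy =>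
        if ((R.getD classifier PySem.Dict.empty).getD strategy PySem.Dict.empty).contains task_id
        then in_all else false) in_all) true
    if in_all then complete_tasks ++ [task_id] else complete_tasks) []

-- ===== PORT B =====
def obtain_complete_tasks_alt (results : List (String × List (String × List (Int × Int)))) (tasks : List (Int × Int)) (classifiers : Option (List String)) : List Int :=
  let R := pvResultsDict results
  let cs : List String := classifiers.getD R.keys
  let pairs : List (PySem.Dict Int Int) :=
    cs.flatMap (fun c => (R.getD c PySem.Dict.empty).values)
  let count : PySem.Dict Int Int :=
    pairs.foldl (fun count d =>
      (PySem.Set.ofList d.keys).foldl (fun count t => count.insert t (count.getD t 0 + 1)) count)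
      PySem.Dict.empty
  let n : Int := Int.ofNat pairs.length
  (PySem.Dict.ofList tasks).keys.filter (fun t => count.getD t 0 == n)

-- ===== PRECONDITION & SPEC =====
-- Pre_ excludes inputs where an explicitly given classifier name is absent from results:
-- there results[classifier] raises KeyError in B (and in A as soon as tasks is non-empty;
-- with tasks empty A happens never to evaluate the lookup and returns []).
def Pre_obtain_complete_tasks (results : List (String × List (String × List (Int × Int)))) (tasks : List (Int × Int)) (classifiers : Option (List String)) : Prop :=
  ∀ c ∈ classifiers.getD [], c ∈ results.map Prod.fst
instance (results : List (String × List (String × List (Int × Int)))) (tasks : List (Int × Int)) (classifiers : Option (List String)) : Decidable (Pre_obtain_complete_tasks results tasks classifiers) := by unfold Pre_obtain_complete_tasks; infer_instance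

def pvWitness_obtain_complete_tasks : (List (String × List (String × List (Int × Int)))) × (List (Int × Int)) × Option (List String) :=
  ([("c", [("s", [(1, 0), (3, 0)])])], [(1, 2), (2, 5), (3, 4)], none)

def Spec_obtain_complete_tasks (results : List (String × List (String × List (Int × Int)))) (tasks : List (Int × Int)) (classifiers : Option (List String)) (out : List Int) : Prop := out = obtain_complete_tasks_alt results tasks classifiers
instance (results : List (String × List (String × List (Int × Int)))) (tasks : List (Int × Int)) (classifiers : Option (List String)) (out : List Int) : Decidable (Spec_obtain_complete_tasks results tasks classifiers out) := by unfold Spec_obtain_complete_tasks; infer_instance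

-- ===== CLAIM (what is proved, stated in full; the proofs are below) =====
def Claim_equal_obtain_complete_tasks : Prop := ∀ (results : List (String × List (String × List (Int × Int)))) (tasks : List (Int × Int)) (classifiers : Option (List String)), Dom_obtain_complete_tasks results tasks classifiers → Pre_obtain_complete_tasks results tasks classifiers → Spec_obtain_complete_tasks results tasks classifiers (obtain_complete_tasks results tasks classifiers)

-- ===== LEMMAS AND PROOFS =====

-- A's inner accumulation 'if p x then b else false' is b && all p
theorem pv_foldl_and {α : Type} (l : List α) (p : α → Bool) (b : Bool) :
    l.foldl (fun b x => if p x then b else false) b = (b && l.all p) := by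
  induction l generalizing b with
  | nil => simp
  | cons x xs ih =>
    rw [List.foldl_cons, List.all_cons]
    cases h : p x
    · rw [if_neg (by simp), ih]; simp
    · rw [if_pos rfl, ih]; simp

-- a nested foldl is a foldl over the flattened list
theorem pv_foldl_foldl {α β γ : Type} (l : List γ) (g : γ → List α) (f : β → α → β) (b : β) :
    l.foldl (fun b c => (g c).foldl f b) b = (l.flatMap g).foldl f b := by
  induction l generalizing b with
  | nil => simp
  | cons c cs ih => simp [List.flatMap_cons, List.foldl_append, ih]

-- counting occurrences in a flattened list, segment by segment
theorem pv_count_flatMap {α β : Type} [DecidableEq α] (l : List β) (g : β → List α) (t : α) :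
    (l.flatMap g).count t = (l.map (fun x => (g x).count t)).sum := by
  induction l with
  | nil => rfl
  | cons x xs ih => simp [List.flatMap_cons, List.count_append, ih]

-- a nodup segment contributes 1 exactly when t is a member
theorem pv_count_nodup {α : Type} [DecidableEq α] (l : List α) (h : l.Nodup) (t : α) :
    l.count t = if t ∈ l then 1 else 0 := by
  split_ifs with hm
  · exact List.count_eq_one_of_mem h hm
  · exact List.count_eq_zero.mpr hm

-- a sum of membership indicators is a countP
theorem pv_sum_indicator {β : Type} (l : List β) (p : β → Bool) :
    (l.map (fun x => if p x then 1 else 0)).sum = l.countP p := by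
  induction l with
  | nil => rfl
  | cons x xs ih =>
    rw [List.map_cons, List.sum_cons, List.countP_cons, ih]
    cases h : p x <;> simp [Nat.add_comm]

-- every value of an ofList dict comes from the input pair list
theorem pv_values_foldl_insert {K V : Type} [BEq K] [LawfulBEq K] (L : List (K × V)) (d0 : PySem.Dict K V) (w : V)
    (h : w ∈ (L.foldl (fun d p => d.insert p.1 p.2) d0).values) : w ∈ d0.values ∨ w ∈ L.map Prod.snd := by
  induction L generalizing d0 with
  | nil => exact Or.inl h
  | cons p ps ih =>
    rw [List.foldl_cons] at h
    rcases ih _ h with h' | h'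
    · rcases PySem.Dict.mem_values_insert _ _ _ _ h' with rfl | h''
      · right; simp
      · left; exact h''
    · right; simp [h']

theorem pv_values_ofList {K V : Type} [BEq K] [LawfulBEq K] (L : List (K × V)) (w : V)
    (h : w ∈ (PySem.Dict.ofList L).values) : w ∈ L.map Prod.snd := by
  rcases pv_values_foldl_insert L PySem.Dict.empty w h with h' | h'
  · simp [PySem.Dict.values, PySem.Dict.empty] at h'
  · exact h'

-- the inner (strategy → task dict) dicts of the marshalled results all have unique keys
theorem pv_inner_nodup (results : List (String × List (String × List (Int × Int)))) (c : String) :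
    ((pvResultsDict results).getD c PySem.Dict.empty).keys.Nodup := by
  show (((pvResultsDict results).get? c).getD PySem.Dict.empty).keys.Nodup
  cases h : (pvResultsDict results).get? c with
  | none => exact PySem.Dict.nodup_keys_empty
  | some d =>
    have hit : (c, d) ∈ (pvResultsDict results).items := PySem.Dict.mem_items_of_get?_eq_some _ h
    have hv : d ∈ (pvResultsDict results).values := List.mem_map_of_mem hit
    have hm := pv_values_ofList _ _ hv
    rw [List.map_map] at hm
    obtain ⟨p, -, rfl⟩ := List.mem_map.mp hm
    exact PySem.Dict.nodup_keys_ofList _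

theorem pv_body_eq (R : PySem.Dict String (PySem.Dict String (PySem.Dict Int Int)))
    (hnd : ∀ c, (R.getD c PySem.Dict.empty).keys.Nodup)
    (cls : List String) (ks : List Int) :
    ks.foldl (fun acc t =>
      if cls.foldl (fun b c =>
          (R.getD c PySem.Dict.empty).keys.foldl (fun b s =>
            if ((R.getD c PySem.Dict.empty).getD s PySem.Dict.empty).contains t then b else false) b)
          true
      then acc ++ [t] else acc) [] =
    (let pairs : List (PySem.Dict Int Int) :=
      cls.flatMap (fun c => (R.getD c PySem.Dict.empty).values)
     let count : PySem.Dict Int Int :=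
      pairs.foldl (fun count d =>
        (PySem.Set.ofList d.keys).foldl (fun count t => count.insert t (count.getD t 0 + 1)) count)
        PySem.Dict.empty
     ks.filter (fun t => count.getD t 0 == Int.ofNat pairs.length)) := by
  rw [show (fun c => (R.getD c PySem.Dict.empty).values)
      = (fun c => (R.getD c PySem.Dict.empty).keys.map
          (fun s => (R.getD c PySem.Dict.empty).getD s PySem.Dict.empty))
    from funext fun c => PySem.Dict.values_eq_map_keys _ (hnd c) PySem.Dict.empty]
  set pairs : List (PySem.Dict Int Int) :=
    cls.flatMap (fun c => (R.getD c PySem.Dict.empty).keys.map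
      (fun s => (R.getD c PySem.Dict.empty).getD s PySem.Dict.empty)) with hpairs
  -- A's accumulator loop is the filter by "contained in every pair dict"
  have hA : ∀ t : Int, (cls.foldl (fun b c =>
      (R.getD c PySem.Dict.empty).keys.foldl (fun b s =>
        if ((R.getD c PySem.Dict.empty).getD s PySem.Dict.empty).contains t then b else false) b) true)
      = pairs.all (fun d => d.contains t) := by
    intro t
    rw [List.foldl_ext _ (fun b c =>
        ((R.getD c PySem.Dict.empty).keys.map
          (fun s => (R.getD c PySem.Dict.empty).getD s PySem.Dict.empty)).foldl
          (fun b d => if d.contains t then b else false) b) true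
        (fun b c _ => by simp only [List.foldl_map]),
      pv_foldl_foldl, pv_foldl_and, Bool.true_and]
  -- B's counter records, for each t, the number of pair dicts containing t
  have hC : ∀ t : Int,
      (pairs.foldl (fun count d =>
        (PySem.Set.ofList d.keys).foldl (fun count t => count.insert t (count.getD t 0 + 1)) count)
        PySem.Dict.empty).getD t 0
      = Int.ofNat (pairs.countP (fun d => d.contains t)) := by
    intro t
    rw [pv_foldl_foldl, PySem.Dict.foldl_insert_getD_add_one_eq_counter,
      PySem.Dict.getD_counter, pv_count_flatMap]
    have : ∀ d : PySem.Dict Int Int,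
        (PySem.Set.ofList d.keys).count t = if d.contains t then 1 else 0 := by
      intro d
      rw [pv_count_nodup _ (PySem.Set.nodup_ofList _) t]
      simp [PySem.Set.mem_ofList, PySem.Dict.contains_eq_decide_mem_keys]
    simp only [this, pv_sum_indicator]
    rfl
  rw [PySem.List.foldl_append_if_eq_filter, List.nil_append]
  refine List.filter_congr (fun t _ => ?_)
  rw [hA t, hC t]
  -- count == length  iff  all pairs contain t
  rw [Bool.eq_iff_iff]
  simp only [List.all_eq_true, beq_iff_eq, Int.ofNat_eq_natCast, Nat.cast_inj,
    List.countP_eq_length]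

-- ===== VERDICT (by name: the statement is the Claim_ definition above) =====
theorem obtain_complete_tasks_spec : Claim_equal_obtain_complete_tasks := by
  intro results tasks classifiers _ _
  show obtain_complete_tasks results tasks classifiers
      = obtain_complete_tasks_alt results tasks classifiers
  unfold obtain_complete_tasks obtain_complete_tasks_alt
  cases classifiers <;> exact pv_body_eq _ (pv_inner_nodup results) _ _
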